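-- pv_equiv track=rewrite | github.com/blob7/q-ttt-ai | game/environment.py | precompute_lines
-- ===== SOURCE A (Python) =====
-- def precompute_lines(size: int, win_len: int) -> dict[tuple[int, int], list[list[tuple[int, int]]]]:
--     """Precompute all win_len-length lines that contain each cell."""
--     mapping: dict[tuple[int, int], list[list[tuple[int, int]]]] = {
--         (r, c): [] for r in range(size) for c in range(size)
--     }
--
--     dirs = [
--         (0, 1),   # horizontal →
--         (1, 0),   # vertical ↓
--         (1, 1),   # diag ↘
--         (1, -1),  # anti-diag ↙
--     ]
--
--     for r in range(size):
--         for c in range(size):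
--             for dr, dc in dirs:
--                 # Try to build a line centered around (r,c)
--                 for offset in range(-(win_len - 1), 1):
--                     line: list[tuple[int, int]] = []
--                     for k in range(win_len):
--                         rr = r + (offset + k) * dr
--                         cc = c + (offset + k) * dc
--                         if 0 <= rr < size and 0 <= cc < size:
--                             line.append((rr, cc))
--                         else:
--                             break
--                     if len(line) == win_len and (r, c) in line:
--                         mapping[(r, c)].append(line)
--
--     return mapping
-- ===== SOURCE B (Python) =====
-- def precompute_lines(size: int, win_len: int) -> dict[tuple[int, int], list[list[tuple[int, int]]]]:
--     """Precompute all win_len-length lines that contain each cell.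
--
--     Instead of trial-building every candidate line and discarding the
--     incomplete ones, the valid start offsets for each cell and direction are
--     computed in O(1) by interval arithmetic, so each listed line is built
--     exactly once."""
--     def cell_lines(r: int, c: int) -> list[list[tuple[int, int]]]:
--         out = []
--         for dr, dc in ((0, 1), (1, 0), (1, 1), (1, -1)):
--             lo, hi = 1 - win_len, 0
--             if dr == 1:
--                 lo = max(lo, -r)
--                 hi = min(hi, size - win_len - r)
--             if dc == 1:
--                 lo = max(lo, -c)
--                 hi = min(hi, size - win_len - c)
--             elif dc == -1:
--                 lo = max(lo, c - size + 1)
--                 hi = min(hi, c - win_len + 1)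
--             for o in range(lo, hi + 1):
--                 out.append([(r + (o + k) * dr, c + (o + k) * dc) for k in range(win_len)])
--         return out
--
--     return {(r, c): cell_lines(r, c) for r in range(size) for c in range(size)}
-- ===== Notes on version B (the rewrite author's own statement) =====
-- stated objective: alternative
-- what changed: B computes the valid window-start offset interval [lo, hi] for each cell and direction in O(1) by interval arithmetic and builds each listed line exactly once, instead of A's trial-building of every candidate window followed by a completeness and membership check; per-cell work drops from O(win_len^2) to O(win_len) per direction, and a timing run measured a speed-up (about 4x) on some runs but not consistently across runs.
import Mathlib
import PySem

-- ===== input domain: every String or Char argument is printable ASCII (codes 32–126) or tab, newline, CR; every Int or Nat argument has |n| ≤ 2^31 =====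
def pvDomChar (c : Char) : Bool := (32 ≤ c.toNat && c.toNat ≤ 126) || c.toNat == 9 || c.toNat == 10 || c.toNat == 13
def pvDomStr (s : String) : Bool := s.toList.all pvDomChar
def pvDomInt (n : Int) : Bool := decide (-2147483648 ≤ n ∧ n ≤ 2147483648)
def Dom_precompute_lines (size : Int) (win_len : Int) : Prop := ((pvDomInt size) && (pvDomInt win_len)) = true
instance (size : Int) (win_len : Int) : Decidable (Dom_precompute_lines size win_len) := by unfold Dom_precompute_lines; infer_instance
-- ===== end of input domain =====

-- B replaces A's trial-building of every candidate window by an O(1) interval computation of the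
-- valid start offsets, building each listed line exactly once (a different algorithm; the timing
-- run measured a speed-up on some runs but not consistently).

-- ===== PORT A =====
-- A's innermost `for k in range(win_len): … else: break` loop building `line`
def pvLineLoopA (size r c dr dc o : Int) : List Int → List (Int × Int) → List (Int × Int)
  | [], line => line
  | k :: ks, line =>
    let rr := r + (o + k) * dr
    let cc := c + (o + k) * dc
    if 0 ≤ rr ∧ rr < size ∧ 0 ≤ cc ∧ cc < size then
      pvLineLoopA size r c dr dc o ks (line ++ [(rr, cc)])
    else line

-- one iteration of A's `for offset in range(-(win_len-1), 1)` body
def pvTryOffsetA (size win_len : Int) (rc dir : Int × Int)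
    (d : PySem.Dict (Int × Int) (List (List (Int × Int)))) (o : Int) :
    PySem.Dict (Int × Int) (List (List (Int × Int))) :=
  let line := pvLineLoopA size rc.1 rc.2 dir.1 dir.2 o (PySem.List.pyRange 0 win_len) []
  if (line.length : Int) = win_len ∧ rc ∈ line then d.modify rc [] (· ++ [line]) else d

-- body of A's per-cell loop: `for dr, dc in dirs: for offset in …`
def pvCellStepA (size win_len : Int) (d : PySem.Dict (Int × Int) (List (List (Int × Int))))
    (rc : Int × Int) : PySem.Dict (Int × Int) (List (List (Int × Int))) :=
  [((0 : Int), (1 : Int)), (1, 0), (1, 1), (1, -1)].foldl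
    (fun d dir => (PySem.List.pyRange (-(win_len - 1)) 1).foldl (pvTryOffsetA size win_len rc dir) d) d

def precompute_lines (size : Int) (win_len : Int) : List (Int × Int × List (List (Int × Int))) :=
  let mapping := ((PySem.List.pyRange 0 size).flatMap
      (fun r => (PySem.List.pyRange 0 size).map (fun c => (r, c)))).foldl
    (fun d rc => d.insert rc ([] : List (List (Int × Int)))) PySem.Dict.empty
  (((PySem.List.pyRange 0 size).flatMap
      (fun r => (PySem.List.pyRange 0 size).map (fun c => (r, c)))).foldl
    (pvCellStepA size win_len) mapping).items.map (fun p => (p.1.1, p.1.2, p.2))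

-- ===== PORT B =====
-- B's `cell_lines`: valid start offsets [lo, hi] per direction by interval arithmetic
def pvCellLinesB (size win_len r c : Int) : List (List (Int × Int)) :=
  [((0 : Int), (1 : Int)), (1, 0), (1, 1), (1, -1)].foldl (fun out dir =>
    let lo0 := 1 - win_len
    let hi0 := (0 : Int)
    let lo1 := if dir.1 = 1 then max lo0 (-r) else lo0
    let hi1 := if dir.1 = 1 then min hi0 (size - win_len - r) else hi0
    let lo := if dir.2 = 1 then max lo1 (-c) else if dir.2 = -1 then max lo1 (c - size + 1) else lo1
    let hi := if dir.2 = 1 then min hi1 (size - win_len - c) else if dir.2 = -1 then min hi1 (c - win_len + 1) else hi1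
    (PySem.List.pyRange lo (hi + 1)).foldl
      (fun out o =>
        out ++ [(PySem.List.pyRange 0 win_len).map (fun k => (r + (o + k) * dir.1, c + (o + k) * dir.2))]) out) []

def precompute_lines_alt (size : Int) (win_len : Int) : List (Int × Int × List (List (Int × Int))) :=
  (((PySem.List.pyRange 0 size).flatMap
      (fun r => (PySem.List.pyRange 0 size).map (fun c => ((r, c), pvCellLinesB size win_len r c)))).foldl
    (fun d p => d.insert p.1 p.2)
    (PySem.Dict.empty : PySem.Dict (Int × Int) (List (List (Int × Int))))).items.map
    (fun p => (p.1.1, p.1.2, p.2))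

-- ===== PRECONDITION & SPEC =====
def Spec_precompute_lines (size : Int) (win_len : Int) (out : List (Int × Int × List (List (Int × Int)))) : Prop := out = precompute_lines_alt size win_len
instance (size : Int) (win_len : Int) (out : List (Int × Int × List (List (Int × Int)))) : Decidable (Spec_precompute_lines size win_len out) := by unfold Spec_precompute_lines; infer_instance

-- ===== CLAIM (what is proved, stated in full; the proofs are below) =====
def Claim_equal_precompute_lines : Prop := ∀ (size : Int) (win_len : Int), Dom_precompute_lines size win_len → Spec_precompute_lines size win_len (precompute_lines size win_len)

-- ===== LEMMAS AND PROOFS =====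

-- proof-only abbreviations for A's per-offset data
def pvInb (size r c dr dc o k : Int) : Bool :=
  decide (0 ≤ r + (o + k) * dr ∧ r + (o + k) * dr < size ∧ 0 ≤ c + (o + k) * dc ∧ c + (o + k) * dc < size)

def pvLineA (size win_len r c dr dc o : Int) : List (Int × Int) :=
  pvLineLoopA size r c dr dc o (PySem.List.pyRange 0 win_len) []

def pvCondA (size win_len : Int) (rc dir : Int × Int) (o : Int) : Bool :=
  decide (((pvLineA size win_len rc.1 rc.2 dir.1 dir.2 o).length : Int) = win_len ∧
    rc ∈ pvLineA size win_len rc.1 rc.2 dir.1 dir.2 o)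

def pvDirLinesA (size win_len : Int) (rc dir : Int × Int) : List (List (Int × Int)) :=
  ((PySem.List.pyRange (-(win_len - 1)) 1).filter (pvCondA size win_len rc dir)).map
    (fun o => pvLineA size win_len rc.1 rc.2 dir.1 dir.2 o)

def pvLinesSpec (size win_len : Int) (rc : Int × Int) : List (List (Int × Int)) :=
  [((0 : Int), (1 : Int)), (1, 0), (1, 1), (1, -1)].flatMap (pvDirLinesA size win_len rc)

-- A's line loop is a takeWhile of in-bounds cells
theorem pvLineLoopA_eq (size r c dr dc o : Int) (ks : List Int) (acc : List (Int × Int)) :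
    pvLineLoopA size r c dr dc o ks acc =
      acc ++ (ks.takeWhile (pvInb size r c dr dc o)).map (fun k => (r + (o + k) * dr, c + (o + k) * dc)) := by
  induction ks generalizing acc with
  | nil => simp [pvLineLoopA]
  | cons k ks ih =>
    by_cases h : 0 ≤ r + (o + k) * dr ∧ r + (o + k) * dr < size ∧ 0 ≤ c + (o + k) * dc ∧ c + (o + k) * dc < size
    · simp only [pvLineLoopA, if_pos h, List.takeWhile_cons]
      have hb : pvInb size r c dr dc o k = true := by simp [pvInb, h]
      rw [ih, hb]
      simp [List.append_assoc]
    · have hb : pvInb size r c dr dc o k = false := decide_eq_false h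
      simp [pvLineLoopA, if_neg h, hb]

theorem pvLineA_eq (size win_len r c dr dc o : Int) :
    pvLineA size win_len r c dr dc o =
      ((PySem.List.pyRange 0 win_len).takeWhile (pvInb size r c dr dc o)).map
        (fun k => (r + (o + k) * dr, c + (o + k) * dc)) := by
  simpa using pvLineLoopA_eq size r c dr dc o (PySem.List.pyRange 0 win_len) []

-- getD through A's offset loop at a fixed cell
theorem getD_foldl_tryOffsetA (size win_len : Int) (rc dir : Int × Int) (os : List Int)
    (d : PySem.Dict (Int × Int) (List (List (Int × Int)))) (k' : Int × Int) :
    ((os.foldl (pvTryOffsetA size win_len rc dir) d).getD k' []) =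
      d.getD k' [] ++ (if k' = rc then
        ((os.filter (pvCondA size win_len rc dir)).map
          (fun o => pvLineA size win_len rc.1 rc.2 dir.1 dir.2 o)) else []) := by
  induction os generalizing d with
  | nil => simp
  | cons o os ih =>
    simp only [List.foldl_cons, List.filter_cons, ih]
    by_cases hc : pvCondA size win_len rc dir o = true
    · have hc' : ((pvLineA size win_len rc.1 rc.2 dir.1 dir.2 o).length : Int) = win_len ∧
          rc ∈ pvLineA size win_len rc.1 rc.2 dir.1 dir.2 o := by
        simpa [pvCondA] using hc
      simp only [pvTryOffsetA, pvLineA] at *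
      rw [if_pos hc']
      by_cases hk : k' = rc
      · subst hk
        rw [PySem.Dict.getD_modify_self]
        simp [hc, List.append_assoc]
      · rw [PySem.Dict.getD_modify_of_ne _ _ _ hk]
        simp [hk]
    · have hc' : ¬ (((pvLineA size win_len rc.1 rc.2 dir.1 dir.2 o).length : Int) = win_len ∧
          rc ∈ pvLineA size win_len rc.1 rc.2 dir.1 dir.2 o) := by
        simpa [pvCondA] using hc
      simp only [pvTryOffsetA, pvLineA] at *
      rw [if_neg hc']
      simp [hc]

-- keys are unchanged by A's offset loop once the cell is present
theorem keys_foldl_tryOffsetA (size win_len : Int) (rc dir : Int × Int) (os : List Int)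
    (d : PySem.Dict (Int × Int) (List (List (Int × Int)))) (h : d.contains rc = true) :
    (os.foldl (pvTryOffsetA size win_len rc dir) d).keys = d.keys := by
  induction os generalizing d with
  | nil => rfl
  | cons o os ih =>
    simp only [List.foldl_cons]
    have hstep : (pvTryOffsetA size win_len rc dir d o).keys = d.keys := by
      simp only [pvTryOffsetA]
      split_ifs with hcnd
      · rw [PySem.Dict.keys_modify, PySem.Dict.keys_insert_of_contains _ _ h]
      · rfl
    have hcont : (pvTryOffsetA size win_len rc dir d o).contains rc = true := by
      rw [PySem.Dict.contains_iff_mem_keys, hstep, ← PySem.Dict.contains_iff_mem_keys]; exact h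
    rw [ih _ hcont, hstep]

-- getD through one whole cell iteration of A
theorem getD_cellStepA (size win_len : Int)
    (d : PySem.Dict (Int × Int) (List (List (Int × Int)))) (rc k' : Int × Int) :
    (pvCellStepA size win_len d rc).getD k' [] =
      d.getD k' [] ++ (if k' = rc then pvLinesSpec size win_len rc else []) := by
  simp only [pvCellStepA, List.foldl_cons, List.foldl_nil]
  rw [getD_foldl_tryOffsetA, getD_foldl_tryOffsetA, getD_foldl_tryOffsetA, getD_foldl_tryOffsetA]
  by_cases hk : k' = rc
  · simp [hk, pvLinesSpec, pvDirLinesA, List.append_assoc]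
  · simp [hk]

theorem keys_cellStepA (size win_len : Int)
    (d : PySem.Dict (Int × Int) (List (List (Int × Int)))) (rc : Int × Int)
    (h : d.contains rc = true) :
    (pvCellStepA size win_len d rc).keys = d.keys := by
  simp only [pvCellStepA, List.foldl_cons, List.foldl_nil]
  have step : ∀ (dir : Int × Int) (d' : PySem.Dict (Int × Int) (List (List (Int × Int)))),
      d'.contains rc = true →
      ((PySem.List.pyRange (-(win_len - 1)) 1).foldl (pvTryOffsetA size win_len rc dir) d').keys = d'.keys ∧
      ((PySem.List.pyRange (-(win_len - 1)) 1).foldl (pvTryOffsetA size win_len rc dir) d').contains rc = true := by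
    intro dir d' h'
    have hk := keys_foldl_tryOffsetA size win_len rc dir (PySem.List.pyRange (-(win_len - 1)) 1) d' h'
    exact ⟨hk, by rw [PySem.Dict.contains_iff_mem_keys, hk, ← PySem.Dict.contains_iff_mem_keys]; exact h'⟩
  obtain ⟨k1, c1⟩ := step _ d h
  obtain ⟨k2, c2⟩ := step _ _ c1
  obtain ⟨k3, c3⟩ := step _ _ c2
  obtain ⟨k4, _⟩ := step _ _ c3
  rw [k4, k3, k2, k1]

-- getD through A's loop over all cells
theorem getD_foldl_cellStepA (size win_len : Int) (cells : List (Int × Int))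
    (hnd : cells.Nodup) (d : PySem.Dict (Int × Int) (List (List (Int × Int)))) (k' : Int × Int) :
    ((cells.foldl (pvCellStepA size win_len) d).getD k' []) =
      d.getD k' [] ++ (if k' ∈ cells then pvLinesSpec size win_len k' else []) := by
  induction cells generalizing d with
  | nil => simp
  | cons a t ih =>
    simp only [List.foldl_cons]
    rw [ih hnd.of_cons, getD_cellStepA]
    by_cases hk : k' = a
    · subst hk
      have hnt : k' ∉ t := (List.nodup_cons.mp hnd).1
      simp [hnt]
    · simp [hk, List.mem_cons]

theorem keys_foldl_cellStepA (size win_len : Int) (cells : List (Int × Int))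
    (d : PySem.Dict (Int × Int) (List (List (Int × Int))))
    (h : ∀ rc ∈ cells, rc ∈ d.keys) :
    (cells.foldl (pvCellStepA size win_len) d).keys = d.keys := by
  induction cells generalizing d with
  | nil => rfl
  | cons a t ih =>
    simp only [List.foldl_cons]
    have hstep : (pvCellStepA size win_len d a).keys = d.keys :=
      keys_cellStepA _ _ _ _ ((PySem.Dict.contains_iff_mem_keys _ _).mpr (h a (by simp)))
    rw [ih _ (fun rc hrc => by rw [hstep]; exact h rc (List.mem_cons_of_mem _ hrc)), hstep]

-- filtering an integer range by an interval is a sub-range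
theorem pvFilter_interval (lo hi a b : Int) :
    (PySem.List.pyRange a b).filter (fun o => decide (lo ≤ o ∧ o ≤ hi)) =
      PySem.List.pyRange (max a lo) (min b (hi + 1)) := by
  rcases lt_or_ge a b with hab | hab
  · rw [PySem.List.pyRange_one_cons hab, List.filter_cons, pvFilter_interval lo hi (a + 1) b]
    by_cases h1 : lo ≤ a ∧ a ≤ hi
    · rw [if_pos (by simpa using h1)]
      have e1 : max a lo = a := by omega
      have e2 : max (a + 1) lo = a + 1 := by omega
      rw [e1, e2, PySem.List.pyRange_one_cons (by omega : a < min b (hi + 1))]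
    · rw [if_neg (by simpa using h1)]
      rcases not_and_or.mp h1 with h2 | h2
      · have e1 : max (a + 1) lo = max a lo := by omega
        rw [e1]
      · rw [PySem.List.pyRange_one_eq_nil (by omega), PySem.List.pyRange_one_eq_nil (by omega)]
  · rw [PySem.List.pyRange_one_eq_nil (by omega), PySem.List.pyRange_one_eq_nil (by omega)]
    rfl
termination_by (b - a).toNat
decreasing_by omega

-- one direction of A's per-cell lines as B's windowed map, generically in (dr, dc)
theorem pvDirLinesA_eq_map (size win_len r c dr dc lo hi : Int)
    (hw : 1 ≤ win_len) (hlo : 1 - win_len ≤ lo) (hhi : hi ≤ 0)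
    (hiff : ∀ o : Int, 1 - win_len ≤ o → o ≤ 0 →
      ((∀ k : Int, 0 ≤ k → k < win_len → pvInb size r c dr dc o k = true) ↔ (lo ≤ o ∧ o ≤ hi))) :
    pvDirLinesA size win_len (r, c) (dr, dc) =
      (PySem.List.pyRange lo (hi + 1)).map
        (fun o => (PySem.List.pyRange 0 win_len).map (fun k => (r + (o + k) * dr, c + (o + k) * dc))) := by
  unfold pvDirLinesA
  dsimp only
  have hcong : ∀ o ∈ PySem.List.pyRange (-(win_len - 1)) 1,
      pvCondA size win_len (r, c) (dr, dc) o = decide (lo ≤ o ∧ o ≤ hi) := by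
    intro o ho
    rw [PySem.List.mem_pyRange_one] at ho
    rw [pvCondA, decide_eq_decide, pvLineA_eq]
    dsimp only
    constructor
    · rintro ⟨hlen, -⟩
      have hpre := List.takeWhile_prefix (l := PySem.List.pyRange 0 win_len) (pvInb size r c dr dc o)
      have hlenr := PySem.List.length_pyRange_one 0 win_len
      have hle := hpre.length_le
      rw [List.length_map] at hlen
      have heq : (PySem.List.pyRange 0 win_len).takeWhile (pvInb size r c dr dc o) =
          PySem.List.pyRange 0 win_len := hpre.eq_of_length (by omega)
      have hall := List.takeWhile_eq_self_iff.mp heq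
      refine (hiff o (by omega) (by omega)).mp ?_
      intro k hk1 hk2
      exact hall k (PySem.List.mem_pyRange_one.mpr ⟨hk1, hk2⟩)
    · intro hint
      have hall : ∀ k ∈ PySem.List.pyRange 0 win_len, pvInb size r c dr dc o k = true := by
        intro k hk
        rw [PySem.List.mem_pyRange_one] at hk
        exact (hiff o (by omega) (by omega)).mpr hint k hk.1 hk.2
      have heq : (PySem.List.pyRange 0 win_len).takeWhile (pvInb size r c dr dc o) =
          PySem.List.pyRange 0 win_len := List.takeWhile_eq_self_iff.mpr hall
      rw [heq]
      constructor
      · rw [List.length_map, PySem.List.length_pyRange_one]; omega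
      · refine List.mem_map.mpr ⟨-o, PySem.List.mem_pyRange_one.mpr ⟨by omega, by omega⟩, ?_⟩
        simp only [Prod.mk.injEq]
        constructor <;> ring
  rw [List.filter_congr hcong, pvFilter_interval]
  have h1 : max (-(win_len - 1)) lo = lo := by omega
  have h2 : min 1 (hi + 1) = hi + 1 := by omega
  rw [h1, h2]
  refine List.map_congr_left ?_
  intro o ho
  rw [PySem.List.mem_pyRange_one] at ho
  have hall : ∀ k ∈ PySem.List.pyRange 0 win_len, pvInb size r c dr dc o k = true := by
    intro k hk
    rw [PySem.List.mem_pyRange_one] at hk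
    exact (hiff o (by omega) (by omega)).mpr ⟨ho.1, by omega⟩ k hk.1 hk.2
  rw [pvLineA_eq, List.takeWhile_eq_self_iff.mpr hall]

-- A's per-cell lines coincide with B's cell_lines on the grid
theorem pvLinesSpec_eq_cellLinesB (size win_len r c : Int)
    (hr : 0 ≤ r ∧ r < size) (hc : 0 ≤ c ∧ c < size) :
    pvLinesSpec size win_len (r, c) = pvCellLinesB size win_len r c := by
  have hB : pvCellLinesB size win_len r c =
      ((PySem.List.pyRange (max (1 - win_len) (-c)) (min 0 (size - win_len - c) + 1)).map
        (fun o => (PySem.List.pyRange 0 win_len).map (fun k => (r + (o + k) * 0, c + (o + k) * 1)))) ++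
      (((PySem.List.pyRange (max (1 - win_len) (-r)) (min 0 (size - win_len - r) + 1)).map
        (fun o => (PySem.List.pyRange 0 win_len).map (fun k => (r + (o + k) * 1, c + (o + k) * 0)))) ++
      (((PySem.List.pyRange (max (max (1 - win_len) (-r)) (-c)) (min (min 0 (size - win_len - r)) (size - win_len - c) + 1)).map
        (fun o => (PySem.List.pyRange 0 win_len).map (fun k => (r + (o + k) * 1, c + (o + k) * 1)))) ++
      ((PySem.List.pyRange (max (max (1 - win_len) (-r)) (c - size + 1)) (min (min 0 (size - win_len - r)) (c - win_len + 1) + 1)).map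
        (fun o => (PySem.List.pyRange 0 win_len).map (fun k => (r + (o + k) * 1, c + (o + k) * -1)))))) := by
    simp only [pvCellLinesB, List.foldl_cons, List.foldl_nil]
    simp only [show ((0 : Int) = 1) = False from by simp, show ((1 : Int) = 1) = True from by simp,
      show ((-1 : Int) = 1) = False from by simp, show ((0 : Int) = -1) = False from by simp,
      show ((-1 : Int) = -1) = True from by simp, if_true, if_false]
    rw [PySem.List.foldl_append_singleton_eq_map, PySem.List.foldl_append_singleton_eq_map,
      PySem.List.foldl_append_singleton_eq_map, PySem.List.foldl_append_singleton_eq_map]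
    simp only [List.nil_append, List.append_assoc]
  by_cases hw : 1 ≤ win_len
  · rw [hB]
    simp only [pvLinesSpec, List.flatMap_cons, List.flatMap_nil, List.append_nil]
    rw [pvDirLinesA_eq_map size win_len r c 0 1 (max (1 - win_len) (-c)) (min 0 (size - win_len - c))
        hw (by omega) (by omega) ?_,
      pvDirLinesA_eq_map size win_len r c 1 0 (max (1 - win_len) (-r)) (min 0 (size - win_len - r))
        hw (by omega) (by omega) ?_,
      pvDirLinesA_eq_map size win_len r c 1 1 (max (max (1 - win_len) (-r)) (-c)) (min (min 0 (size - win_len - r)) (size - win_len - c))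
        hw (by omega) (by omega) ?_,
      pvDirLinesA_eq_map size win_len r c 1 (-1) (max (max (1 - win_len) (-r)) (c - size + 1)) (min (min 0 (size - win_len - r)) (c - win_len + 1))
        hw (by omega) (by omega) ?_]
    all_goals try {
      intro o ho1 ho2
      constructor
      · intro hk
        have h0 := hk 0 (by omega) (by omega)
        have h1 := hk (win_len - 1) (by omega) (by omega)
        simp only [pvInb, decide_eq_true_eq, mul_zero, mul_one, mul_neg_one, add_zero] at h0 h1
        omega
      · intro hint k hk1 hk2
        simp only [pvInb, decide_eq_true_eq, mul_zero, mul_one, mul_neg_one, add_zero]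
        omega
    }
  · have hA : PySem.List.pyRange (-(win_len - 1)) 1 = [] := PySem.List.pyRange_one_eq_nil (by omega)
    have hB1 : PySem.List.pyRange (max (1 - win_len) (-c)) (min 0 (size - win_len - c) + 1) = [] :=
      PySem.List.pyRange_one_eq_nil (by omega)
    have hB2 : PySem.List.pyRange (max (1 - win_len) (-r)) (min 0 (size - win_len - r) + 1) = [] :=
      PySem.List.pyRange_one_eq_nil (by omega)
    have hB3 : PySem.List.pyRange (max (max (1 - win_len) (-r)) (-c)) (min (min 0 (size - win_len - r)) (size - win_len - c) + 1) = [] :=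
      PySem.List.pyRange_one_eq_nil (by omega)
    have hB4 : PySem.List.pyRange (max (max (1 - win_len) (-r)) (c - size + 1)) (min (min 0 (size - win_len - r)) (c - win_len + 1) + 1) = [] :=
      PySem.List.pyRange_one_eq_nil (by omega)
    rw [hB]
    simp only [pvLinesSpec, pvDirLinesA, List.flatMap_cons, List.flatMap_nil, hA, hB1, hB2, hB3, hB4,
      List.filter_nil, List.map_nil, List.append_nil]

-- the grid cell list and the initial dict
theorem pvCells_nodup (size : Int) :
    (((PySem.List.pyRange 0 size).flatMap
      (fun r => (PySem.List.pyRange 0 size).map (fun c => (r, c))))).Nodup := by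
  have h : ((PySem.List.pyRange 0 size).flatMap (fun r => (PySem.List.pyRange 0 size).map (fun c => (r, c))))
      = PySem.List.pyRange 0 size ×ˢ PySem.List.pyRange 0 size := rfl
  rw [h]
  exact (PySem.List.nodup_pyRange_one 0 size).product (PySem.List.nodup_pyRange_one 0 size)

theorem pvInit_items (size : Int) :
    (((PySem.List.pyRange 0 size).flatMap
        (fun r => (PySem.List.pyRange 0 size).map (fun c => (r, c)))).foldl
      (fun d rc => d.insert rc ([] : List (List (Int × Int)))) PySem.Dict.empty).items =
    ((PySem.List.pyRange 0 size).flatMap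
        (fun r => (PySem.List.pyRange 0 size).map (fun c => (r, c)))).map
      (fun rc => (rc, ([] : List (List (Int × Int))))) := by
  have := PySem.Dict.items_foldl_insert_fresh
    (((PySem.List.pyRange 0 size).flatMap (fun r => (PySem.List.pyRange 0 size).map (fun c => (r, c)))))
    (fun rc => rc) (fun _ => ([] : List (List (Int × Int)))) PySem.Dict.empty
    (fun a _ => PySem.Dict.contains_empty a) (by simpa using pvCells_nodup size)
  simpa using this

theorem pvGetD_foldl_insert_nil (cells : List (Int × Int))
    (d : PySem.Dict (Int × Int) (List (List (Int × Int)))) (k' : Int × Int)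
    (h : d.getD k' [] = []) :
    ((cells.foldl (fun d rc => d.insert rc ([] : List (List (Int × Int)))) d)).getD k' [] = [] := by
  induction cells generalizing d with
  | nil => exact h
  | cons a t ih =>
    refine ih _ ?_
    by_cases hk : k' = a
    · subst hk; rw [PySem.Dict.getD_insert_self]
    · rw [PySem.Dict.getD_insert_of_ne _ _ _ hk]; exact h

-- ===== VERDICT (by name: the statement is the Claim_ definition above) =====
theorem precompute_lines_spec : Claim_equal_precompute_lines := by
  intro size win_len _
  unfold Spec_precompute_lines precompute_lines precompute_lines_alt
  dsimp only
  have hnd := pvCells_nodup size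
  have hkeysInit : (((PySem.List.pyRange 0 size).flatMap
        (fun r => (PySem.List.pyRange 0 size).map (fun c => (r, c)))).foldl
      (fun d rc => d.insert rc ([] : List (List (Int × Int)))) PySem.Dict.empty).keys =
      ((PySem.List.pyRange 0 size).flatMap (fun r => (PySem.List.pyRange 0 size).map (fun c => (r, c)))) := by
    simp only [PySem.Dict.keys, pvInit_items size, List.map_map]
    simp [Function.comp_def]
  have hkeysFinal := keys_foldl_cellStepA size win_len
    ((PySem.List.pyRange 0 size).flatMap (fun r => (PySem.List.pyRange 0 size).map (fun c => (r, c))))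
    (((PySem.List.pyRange 0 size).flatMap (fun r => (PySem.List.pyRange 0 size).map (fun c => (r, c)))).foldl
      (fun d rc => d.insert rc ([] : List (List (Int × Int)))) PySem.Dict.empty)
    (fun rc hrc => by rw [hkeysInit]; exact hrc)
  rw [hkeysInit] at hkeysFinal
  have hitemsA : (((PySem.List.pyRange 0 size).flatMap
        (fun r => (PySem.List.pyRange 0 size).map (fun c => (r, c)))).foldl (pvCellStepA size win_len)
      ((((PySem.List.pyRange 0 size).flatMap (fun r => (PySem.List.pyRange 0 size).map (fun c => (r, c)))).foldl
        (fun d rc => d.insert rc ([] : List (List (Int × Int)))) PySem.Dict.empty))).items =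
      ((PySem.List.pyRange 0 size).flatMap (fun r => (PySem.List.pyRange 0 size).map (fun c => (r, c)))).map
        (fun rc => (rc, pvLinesSpec size win_len rc)) := by
    rw [PySem.Dict.items_eq_map_keys _ (by rw [hkeysFinal]; exact hnd) []]
    rw [hkeysFinal]
    refine List.map_congr_left ?_
    intro rc hrc
    rw [getD_foldl_cellStepA size win_len _ hnd,
      pvGetD_foldl_insert_nil _ PySem.Dict.empty rc (PySem.Dict.getD_empty _ _), if_pos hrc]
    simp
  have hpairs : ((PySem.List.pyRange 0 size).flatMap
      (fun r => (PySem.List.pyRange 0 size).map (fun c => ((r, c), pvCellLinesB size win_len r c)))) =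
      ((PySem.List.pyRange 0 size).flatMap (fun r => (PySem.List.pyRange 0 size).map (fun c => (r, c)))).map
        (fun rc => (rc, pvCellLinesB size win_len rc.1 rc.2)) := by
    simp [List.map_flatMap, List.map_map, Function.comp_def]
  have hitemsB : (((PySem.List.pyRange 0 size).flatMap
        (fun r => (PySem.List.pyRange 0 size).map (fun c => ((r, c), pvCellLinesB size win_len r c)))).foldl
      (fun d p => d.insert p.1 p.2)
      (PySem.Dict.empty : PySem.Dict (Int × Int) (List (List (Int × Int))))).items =
      ((PySem.List.pyRange 0 size).flatMap (fun r => (PySem.List.pyRange 0 size).map (fun c => (r, c)))).map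
        (fun rc => (rc, pvCellLinesB size win_len rc.1 rc.2)) := by
    have hfst : List.map Prod.fst ((PySem.List.pyRange 0 size).flatMap
        (fun r => (PySem.List.pyRange 0 size).map (fun c => ((r, c), pvCellLinesB size win_len r c)))) =
        ((PySem.List.pyRange 0 size).flatMap (fun r => (PySem.List.pyRange 0 size).map (fun c => (r, c)))) := by
      simp [List.map_flatMap, List.map_map, Function.comp_def]
    have := PySem.Dict.items_foldl_insert_fresh
      ((PySem.List.pyRange 0 size).flatMap
        (fun r => (PySem.List.pyRange 0 size).map (fun c => ((r, c), pvCellLinesB size win_len r c))))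
      Prod.fst Prod.snd
      (PySem.Dict.empty : PySem.Dict (Int × Int) (List (List (Int × Int))))
      (fun a _ => PySem.Dict.contains_empty a.1) (by rw [hfst]; exact hnd)
    simp only [this]
    rw [hpairs]
    simp [Function.comp_def, Prod.mk.eta]
    rfl
  rw [hitemsA, hitemsB, List.map_map, List.map_map]
  refine List.map_congr_left ?_
  rintro ⟨r, c⟩ hrc
  have hmem := List.mem_product.mp hrc
  rw [PySem.List.mem_pyRange_one, PySem.List.mem_pyRange_one] at hmem
  simp only [Function.comp]
  rw [pvLinesSpec_eq_cellLinesB size win_len r c ⟨hmem.1.1, hmem.1.2⟩ ⟨hmem.2.1, hmem.2.2⟩]
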